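-- pv_equiv track=rewrite | github.com/paiml/depyler | examples/hard_numeric_patterns.py | is_valid_digit_list
-- ===== SOURCE A (Python) =====
-- def is_valid_digit_list(digits: list[int], base: int) -> int:
--     """Check if all digits are valid for given base. 1=valid, 0=invalid."""
--     if base < 2:
--         return 0
--     i: int = 0
--     while i < len(digits):
--         if digits[i] < 0 or digits[i] >= base:
--             return 0
--         i = i + 1
--     return 1
-- ===== SOURCE B (Python) =====
-- def is_valid_digit_list(digits: list[int], base: int) -> int:
--     """Check if all digits are valid for given base. 1=valid, 0=invalid."""
--     if base < 2:
--         return 0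
--     s = sorted(digits)
--     if not s:
--         return 1
--     return 1 if s[0] >= 0 and s[-1] < base else 0
-- ===== Notes on version B (the rewrite author's own statement) =====
-- stated objective: alternative
-- what changed: Replaced the index-based per-element early-exit while loop with sorting the list once and checking only the two endpoints of the sorted order (smallest >= 0, largest < base).
import Mathlib
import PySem

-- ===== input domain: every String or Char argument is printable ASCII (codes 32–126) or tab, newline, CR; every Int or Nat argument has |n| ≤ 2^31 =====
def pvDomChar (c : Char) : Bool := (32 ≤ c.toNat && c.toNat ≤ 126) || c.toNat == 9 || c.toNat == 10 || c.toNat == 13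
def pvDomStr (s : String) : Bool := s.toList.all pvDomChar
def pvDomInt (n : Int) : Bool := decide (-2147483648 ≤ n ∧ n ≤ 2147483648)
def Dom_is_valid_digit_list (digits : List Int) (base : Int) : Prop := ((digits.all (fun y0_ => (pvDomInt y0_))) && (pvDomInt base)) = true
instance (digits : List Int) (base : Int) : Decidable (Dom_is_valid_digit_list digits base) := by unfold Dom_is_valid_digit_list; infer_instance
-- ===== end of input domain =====

-- B replaces A's index-based early-exit scan with one sort followed by a check of the
-- two endpoints of the sorted order (objective: alternative algorithm, same results).

-- ===== PORT A =====
-- the while loop over index i, as structural recursion over the remaining suffix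
def isValidLoopA : List Int → Int → Int
  | [], _ => 1
  | d :: rest, base => if d < 0 ∨ d ≥ base then 0 else isValidLoopA rest base

def is_valid_digit_list (digits : List Int) (base : Int) : Int :=
  if base < 2 then 0 else isValidLoopA digits base

-- ===== PORT B =====
def is_valid_digit_list_alt (digits : List Int) (base : Int) : Int :=
  if base < 2 then 0
  else
    match PySem.List.sorted digits (fun x => x) false with
    | [] => 1
    | m :: t => if 0 ≤ m ∧ (m :: t).getLast (List.cons_ne_nil m t) < base then 1 else 0

-- ===== PRECONDITION & SPEC =====
def Spec_is_valid_digit_list (digits : List Int) (base : Int) (out : Int) : Prop := out = is_valid_digit_list_alt digits base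
instance (digits : List Int) (base : Int) (out : Int) : Decidable (Spec_is_valid_digit_list digits base out) := by unfold Spec_is_valid_digit_list; infer_instance

-- ===== CLAIM (what is proved, stated in full; the proofs are below) =====
def Claim_equal_is_valid_digit_list : Prop := ∀ (digits : List Int) (base : Int), Dom_is_valid_digit_list digits base → Spec_is_valid_digit_list digits base (is_valid_digit_list digits base)

-- ===== LEMMAS AND PROOFS =====
theorem loopA_char (base : Int) : ∀ (l : List Int),
    isValidLoopA l base = if ∀ d ∈ l, 0 ≤ d ∧ d < base then 1 else 0 := by
  intro l
  induction l with
  | nil => simp [isValidLoopA]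
  | cons d t ih =>
      simp only [isValidLoopA, ih]
      by_cases hd : d < 0 ∨ d ≥ base
      · rw [if_pos hd, if_neg]
        intro hall
        have := hall d (List.mem_cons_self ..)
        omega
      · rw [if_neg hd]
        by_cases ht : ∀ x ∈ t, 0 ≤ x ∧ x < base
        · rw [if_pos ht, if_pos]
          intro x hx
          rcases List.mem_cons.mp hx with rfl | hx'
          · omega
          · exact ht x hx'
        · rw [if_neg ht, if_neg]
          intro hall
          exact ht fun x hx => hall x (List.mem_cons_of_mem d hx)

theorem le_getLast_of_pairwise : ∀ (l : List Int), l.Pairwise (· ≤ ·) →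
    ∀ x ∈ l, ∀ (hne : l ≠ []), x ≤ l.getLast hne := by
  intro l
  induction l with
  | nil => intro _ x hx; cases hx
  | cons a t ih =>
      intro hp x hx hne
      rcases List.pairwise_cons.mp hp with ⟨ha, ht⟩
      cases t with
      | nil => simp at hx ⊢; simp [hx]
      | cons b u =>
          have hlast : (a :: b :: u).getLast hne = (b :: u).getLast (List.cons_ne_nil b u) := by
            simp [List.getLast]
          rw [hlast]
          rcases List.mem_cons.mp hx with rfl | hx'
          · calc x ≤ b := ha b (List.mem_cons_self ..)
              _ ≤ (b :: u).getLast (List.cons_ne_nil b u) :=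
                ih ht b (List.mem_cons_self ..) _
          · exact ih ht x hx' _

-- ===== VERDICT (by name: the statement is the Claim_ definition above) =====
theorem is_valid_digit_list_spec : Claim_equal_is_valid_digit_list := by
  intro digits base _
  unfold Spec_is_valid_digit_list is_valid_digit_list is_valid_digit_list_alt
  by_cases hb : base < 2
  · simp [hb]
  · simp only [hb, if_false]
    rcases hs : PySem.List.sorted digits (fun x => x) false with _ | ⟨m, t⟩
    · have : digits = [] := (PySem.List.sorted_eq_nil_iff digits (fun x => x) false).mp hs
      subst this
      simp [isValidLoopA]
    · rw [loopA_char]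
      have hmem : ∀ x : Int, x ∈ m :: t ↔ x ∈ digits := by
        intro x
        rw [← hs]
        exact PySem.List.mem_sorted digits (fun x => x) false x
      have hpw : (m :: t).Pairwise (fun a b : Int => a ≤ b) := by
        rw [← hs]
        exact PySem.List.sorted_pairwise digits (fun x => x)
      have hhead : ∀ y ∈ digits, m ≤ y := by
        intro y hy
        exact PySem.List.key_head_sorted_le digits (fun x => x) hs y hy
      have hlastmem : (m :: t).getLast (List.cons_ne_nil m t) ∈ digits :=
        (hmem _).mp (List.getLast_mem _)
      have hmmem : m ∈ digits := (hmem m).mp (List.mem_cons_self ..)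
      show (if ∀ d ∈ digits, 0 ≤ d ∧ d < base then (1 : Int) else 0)
          = if 0 ≤ m ∧ (m :: t).getLast (List.cons_ne_nil m t) < base then 1 else 0
      by_cases h1 : ∀ d ∈ digits, 0 ≤ d ∧ d < base
      · rw [if_pos h1, if_pos ⟨(h1 m hmmem).1, (h1 _ hlastmem).2⟩]
      · rw [if_neg h1, if_neg]
        rintro ⟨ha, hb2⟩
        apply h1
        intro d hd
        refine ⟨le_trans ha (hhead d hd), lt_of_le_of_lt ?_ hb2⟩
        exact le_getLast_of_pairwise _ hpw d ((hmem d).mpr hd) _
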